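-- pv_equiv track=rewrite | github.com/singhk1/PythonCode | Python Code/Stack/parentheses.py | parentheses2
-- ===== SOURCE A (Python) =====
-- def parentheses2(s):
--     ls = list(s)
--     count = 0
--     for i in range(len(ls)):
--         if ls[i] == '(':
--             count += 1
--         elif ls[i] == ')':
--             if count == 0:
--                 ls[i] = ""
--             else:
--                 count -= 1
--     l = len(ls) - 1
--     while count > 0 and i >=0:
--         if ls[i] == '(':
--             ls[i] = ""
--             count -= 1
--         i -= 1
--     if count > 0:
--         return ""
--     return ''.join(ls)
-- ===== SOURCE B (Python) =====
-- def parentheses2(s):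
--     balance = 0
--     opens = []
--     remove = set()
--     for i, c in enumerate(s):
--         if c == '(':
--             opens.append(i)
--             balance += 1
--         elif c == ')':
--             if balance > 0:
--                 balance -= 1
--             else:
--                 remove.add(i)
--     remove.update(opens[len(opens) - balance:])
--     return ''.join(c for i, c in enumerate(s) if i not in remove)
-- ===== Notes on version B (the rewrite author's own statement) =====
-- stated objective: alternative
-- what changed: B replaces A's in-place blanking of list entries plus a backward while-loop over the mutated list with a single forward pass that collects the indices of unmatched closing parens and of all opening parens, adds the last `balance` opening indices to a remove-set, and rebuilds the string with one index-filtered join.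
import Mathlib
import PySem

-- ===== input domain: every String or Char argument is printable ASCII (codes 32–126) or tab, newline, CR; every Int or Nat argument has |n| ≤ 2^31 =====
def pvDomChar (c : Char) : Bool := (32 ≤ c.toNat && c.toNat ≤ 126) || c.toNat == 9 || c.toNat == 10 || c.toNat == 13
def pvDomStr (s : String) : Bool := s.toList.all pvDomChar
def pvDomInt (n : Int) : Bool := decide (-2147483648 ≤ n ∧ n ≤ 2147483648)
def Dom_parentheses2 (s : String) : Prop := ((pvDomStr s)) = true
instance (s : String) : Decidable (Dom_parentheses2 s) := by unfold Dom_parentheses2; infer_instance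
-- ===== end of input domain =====

-- B removes invalid parentheses via an index remove-set (unmatched closing indices plus the
-- last `balance` opening indices) instead of A's in-place blanking with a backward while loop;
-- objective: alternative.

-- ===== PORT A =====
-- A's forward for-loop: blanks each unmatched closing paren (ls[i] = "" is modelled as
-- `none`), counting unmatched opening parens.  Entries read at index i are still the
-- original chars, so the input can stay `List Char`.
def pvAfwd : List Char → Int → List (Option Char) × Int
  | [], count => ([], count)
  | c :: t, count =>
    if c = '(' then
      let r := pvAfwd t (count + 1); (some c :: r.1, r.2)
    else if c = ')' then
      if count = 0 then
        let r := pvAfwd t count; (none :: r.1, r.2)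
      else
        let r := pvAfwd t (count - 1); (some c :: r.1, r.2)
    else
      let r := pvAfwd t count; (some c :: r.1, r.2)

-- A's backward while-loop (`while count > 0 and i >= 0`), run over the reversed list:
-- blanks opening-paren entries until count is exhausted; returns the (reversed) list and
-- the final count.
def pvAback : List (Option Char) → Int → List (Option Char) × Int
  | [], count => ([], count)
  | c :: t, count =>
    if count > 0 then
      if c = some '(' then
        let r := pvAback t (count - 1); (none :: r.1, r.2)
      else
        let r := pvAback t count; (c :: r.1, r.2)
    else (c :: t, count)

def parentheses2 (s : String) : String :=
  let r1 := pvAfwd s.toList 0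
  let r2 := pvAback r1.1.reverse r1.2
  if r2.2 > 0 then "" else String.ofList (r2.1.reverse.filterMap id)

-- ===== PORT B =====
-- Source B's loop body over (i, c) pairs; state = (balance, opens, remove).
def pvBstep (st : Int × List Int × PySem.Set Int) (ic : Int × Char) :
    Int × List Int × PySem.Set Int :=
  if ic.2 = '(' then (st.1 + 1, st.2.1 ++ [ic.1], st.2.2)
  else if ic.2 = ')' then
    if st.1 > 0 then (st.1 - 1, st.2.1, st.2.2)
    else (st.1, st.2.1, PySem.Set.add st.2.2 ic.1)
  else st

def parentheses2_alt (s : String) : String :=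
  let cs := s.toList
  let st := (PySem.List.enumerate cs 0).foldl pvBstep (0, [], PySem.Set.empty)
  let remove := PySem.Set.update st.2.2
    (PySem.List.slice st.2.1 (some ((st.2.1.length : Int) - st.1)) none)
  String.ofList ((PySem.List.enumerate cs 0).filterMap
    (fun ic => if PySem.Set.contains remove ic.1 then none else some ic.2))

-- ===== PRECONDITION & SPEC =====
def Spec_parentheses2 (s : String) (out : String) : Prop := out = parentheses2_alt s
instance (s : String) (out : String) : Decidable (Spec_parentheses2 s out) := by unfold Spec_parentheses2; infer_instance

-- ===== CLAIM (what is proved, stated in full; the proofs are below) =====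
def Claim_equal_parentheses2 : Prop := ∀ (s : String), Dom_parentheses2 s → Spec_parentheses2 s (parentheses2 s)

-- ===== LEMMAS AND PROOFS =====

-- indices (offset i0) of opening parens in l
def pvOpn : List Char → Int → List Int
  | [], _ => []
  | c :: t, i0 => if c = '(' then i0 :: pvOpn t (i0 + 1) else pvOpn t (i0 + 1)

-- indices of unmatched closing parens (running balance bal, B's `balance > 0` convention)
def pvBad : List Char → Int → Int → List Int
  | [], _, _ => []
  | c :: t, i0, bal =>
    if c = '(' then pvBad t (i0 + 1) (bal + 1)
    else if c = ')' then
      if bal > 0 then pvBad t (i0 + 1) (bal - 1) else i0 :: pvBad t (i0 + 1) bal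
    else pvBad t (i0 + 1) bal

-- final balance
def pvFb : List Char → Int → Int
  | [], bal => bal
  | c :: t, bal =>
    if c = '(' then pvFb t (bal + 1)
    else if c = ')' then (if bal > 0 then pvFb t (bal - 1) else pvFb t bal)
    else pvFb t bal

-- number of open-paren entries
def pvCntO : List (Option Char) → Int
  | [] => 0
  | c :: t => (if c = some '(' then 1 else 0) + pvCntO t

-- mask l by the index set R
def pvMaskW : List Char → Int → List Int → List (Option Char)
  | [], _, _ => []
  | c :: t, i0, R => (if i0 ∈ R then none else some c) :: pvMaskW t (i0 + 1) R

-- mark the last k opens of m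
def pvMarkL : List (Option Char) → Int → List (Option Char)
  | [], _ => []
  | c :: t, k => (if c = some '(' ∧ pvCntO t < k then none else c) :: pvMarkL t k

-- keep the chars whose index is not in R
def pvSel : List Char → Int → List Int → List Char
  | [], _, _ => []
  | c :: t, i0, R => if i0 ∈ R then pvSel t (i0 + 1) R else c :: pvSel t (i0 + 1) R

theorem pvOpn_lb : ∀ (l : List Char) (i0 j : Int), j ∈ pvOpn l i0 → i0 ≤ j := by
  intro l; induction l with
  | nil => intro i0 j h; simp [pvOpn] at h
  | cons c t ih =>
    intro i0 j h
    simp only [pvOpn] at h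
    split at h
    · rcases List.mem_cons.1 h with h | h
      · omega
      · have := ih _ _ h; omega
    · have := ih _ _ h; omega

theorem pvBad_lb : ∀ (l : List Char) (i0 bal j : Int), j ∈ pvBad l i0 bal → i0 ≤ j := by
  intro l; induction l with
  | nil => intro i0 bal j h; simp [pvBad] at h
  | cons c t ih =>
    intro i0 bal j h
    simp only [pvBad] at h
    split at h
    · have := ih _ _ _ h; omega
    · split at h
      · split at h
        · have := ih _ _ _ h; omega
        · rcases List.mem_cons.1 h with h | h
          · omega
          · have := ih _ _ _ h; omega
      · have := ih _ _ _ h; omega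

theorem pvMaskW_congr : ∀ (l : List Char) (i0 : Int) (R R' : List Int),
    (∀ j, i0 ≤ j → (j ∈ R ↔ j ∈ R')) → pvMaskW l i0 R = pvMaskW l i0 R' := by
  intro l; induction l with
  | nil => intro _ _ _ _; rfl
  | cons c t ih =>
    intro i0 R R' h
    simp only [pvMaskW]
    have h0 := h i0 le_rfl
    have ht := ih (i0 + 1) R R' (fun j hj => h j (by omega))
    rw [ht]
    by_cases hm : i0 ∈ R
    · simp [hm, h0.1 hm]
    · have hm' : i0 ∉ R' := fun hc => hm (h0.2 hc)
      simp [hm, hm']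

-- (1) A's forward pass computes the unmatched-close mask and the final balance
theorem pvAfwd_eq : ∀ (l : List Char) (i0 bal : Int), 0 ≤ bal →
    pvAfwd l bal = (pvMaskW l i0 (pvBad l i0 bal), pvFb l bal) := by
  intro l; induction l with
  | nil => intro i0 bal hb; rfl
  | cons c t ih =>
    intro i0 bal hb
    by_cases hc : c = '('
    · have hni : i0 ∉ pvBad t (i0 + 1) (bal + 1) := fun h => by have := pvBad_lb _ _ _ _ h; omega
      simp [pvAfwd, pvBad, pvFb, pvMaskW, hc, hni, ih (i0 + 1) (bal + 1) (by omega)]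
    · by_cases hc2 : c = ')'
      · by_cases hz : bal = 0
        · subst hz
          have hcg : pvMaskW t (i0 + 1) (i0 :: pvBad t (i0 + 1) 0)
              = pvMaskW t (i0 + 1) (pvBad t (i0 + 1) 0) := by
            apply pvMaskW_congr
            intro j hj
            constructor
            · intro h; rcases List.mem_cons.1 h with h | h
              · omega
              · exact h
            · intro h; exact List.mem_cons_of_mem _ h
          simp [pvAfwd, pvBad, pvFb, pvMaskW, hc, hc2, hcg, ih (i0 + 1) 0 le_rfl]
        · have hni : i0 ∉ pvBad t (i0 + 1) (bal - 1) := fun h => by have := pvBad_lb _ _ _ _ h; omega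
          have hgt : bal > 0 := by omega
          simp [pvAfwd, pvBad, pvFb, pvMaskW, hc, hc2, hz, hgt, hni,
            ih (i0 + 1) (bal - 1) (by omega)]
      · have hni : i0 ∉ pvBad t (i0 + 1) bal := fun h => by have := pvBad_lb _ _ _ _ h; omega
        simp [pvAfwd, pvBad, pvFb, pvMaskW, hc, hc2, hni, ih (i0 + 1) bal hb]

-- (2) B's fold computes the final balance, the open indices and the bad set
theorem pvBfold_eq : ∀ (l : List Char) (i0 bal : Int) (opens : List Int) (rem : PySem.Set Int),
    (PySem.List.enumerate l i0).foldl pvBstep (bal, opens, rem)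
      = (pvFb l bal, opens ++ pvOpn l i0, PySem.Set.update rem (pvBad l i0 bal)) := by
  intro l; induction l with
  | nil => intro i0 bal opens rem; simp [PySem.List.enumerate_nil, pvFb, pvOpn, pvBad, PySem.Set.update]
  | cons c t ih =>
    intro i0 bal opens rem
    rw [PySem.List.enumerate_cons]
    by_cases hc : c = '('
    · simp [pvBstep, pvFb, pvOpn, pvBad, hc, ih (i0 + 1) (bal + 1) (opens ++ [i0]) rem]
    · by_cases hc2 : c = ')'
      · by_cases hgt : bal > 0
        · simp [pvBstep, pvFb, pvOpn, pvBad, hc, hc2, hgt,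
            ih (i0 + 1) (bal - 1) opens rem]
        · simp [pvBstep, pvFb, pvOpn, pvBad, hc, hc2, hgt, PySem.Set.update,
            ih (i0 + 1) bal opens (PySem.Set.add rem i0)]
      · simp [pvBstep, pvFb, pvOpn, pvBad, hc, hc2, ih (i0 + 1) bal opens rem]

theorem pvFb_nonneg : ∀ (l : List Char) (bal : Int), 0 ≤ bal → 0 ≤ pvFb l bal := by
  intro l; induction l with
  | nil => intro bal hb; simpa [pvFb] using hb
  | cons c t ih =>
    intro bal hb
    simp only [pvFb]
    split_ifs <;> [exact ih _ (by omega); exact ih _ (by omega); exact ih _ hb; exact ih _ hb]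

theorem pvFb_le : ∀ (l : List Char) (i0 bal : Int), pvFb l bal ≤ bal + (pvOpn l i0).length := by
  intro l; induction l with
  | nil => intro i0 bal; simp [pvFb, pvOpn]
  | cons c t ih =>
    intro i0 bal
    simp only [pvFb, pvOpn]
    split_ifs with h1 h2 h3
    · have := ih (i0 + 1) (bal + 1); simp [h1]; push_cast; omega
    · have := ih (i0 + 1) (bal - 1); simp [h1] at *; omega
    · have := ih (i0 + 1) bal; simp [h1] at *; omega
    · have := ih (i0 + 1) bal; simp [h1] at *; omega

theorem pvCntO_nonneg : ∀ (m : List (Option Char)), 0 ≤ pvCntO m := by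
  intro m; induction m with
  | nil => simp [pvCntO]
  | cons c t ih => simp only [pvCntO]; split_ifs <;> omega

theorem pvCntO_append : ∀ (a b : List (Option Char)), pvCntO (a ++ b) = pvCntO a + pvCntO b := by
  intro a b; induction a with
  | nil => simp [pvCntO]
  | cons c t ih => simp only [List.cons_append, pvCntO, ih]; ring

theorem pvCntO_reverse : ∀ (m : List (Option Char)), pvCntO m.reverse = pvCntO m := by
  intro m; induction m with
  | nil => rfl
  | cons c t ih => simp only [List.reverse_cons, pvCntO, pvCntO_append, ih, pvCntO]; ring

-- masking only non-open indices keeps every opening paren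
theorem pvCntO_maskW : ∀ (l : List Char) (i0 : Int) (R : List Int),
    (∀ j ∈ R, j ∉ pvOpn l i0) → pvCntO (pvMaskW l i0 R) = ((pvOpn l i0).length : Int) := by
  intro l; induction l with
  | nil => intro i0 R h; simp [pvMaskW, pvOpn, pvCntO]
  | cons c t ih =>
    intro i0 R h
    have hsub : ∀ j ∈ R, j ∉ pvOpn t (i0 + 1) := by
      intro j hj hmem
      apply h j hj
      simp only [pvOpn]
      split_ifs
      · exact List.mem_cons_of_mem _ hmem
      · exact hmem
    have iht := ih (i0 + 1) R hsub
    by_cases hc : c = '('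
    · have hio : i0 ∉ R := fun hi => h i0 hi (by simp [pvOpn, hc])
      simp only [pvMaskW, pvOpn, pvCntO, hc, if_neg hio, if_pos rfl, if_pos,
        List.length_cons, iht]
      push_cast
      omega
    · have hne : ∀ (x : Option Char), x = (if i0 ∈ R then none else some c) → x ≠ some '(' := by
        intro x hx
        split_ifs at hx <;> simp [hx, hc]
      simp only [pvMaskW, pvCntO, if_neg (hne _ rfl), iht]
      by_cases hc2 : c = ')' <;> simp [pvOpn, hc, hc2, iht]

theorem pvBad_disj_opn : ∀ (l : List Char) (i0 bal j : Int),
    j ∈ pvBad l i0 bal → j ∉ pvOpn l i0 := by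
  intro l; induction l with
  | nil => intro i0 bal j h; simp [pvBad] at h
  | cons c t ih =>
    intro i0 bal j h hmem
    simp only [pvBad] at h
    simp only [pvOpn] at hmem
    split_ifs at h with h1 h2 h3
    · rw [if_pos h1] at hmem
      rcases List.mem_cons.1 hmem with hm | hm
      · have := pvBad_lb _ _ _ _ h; omega
      · exact ih _ _ _ h hm
    · rw [if_neg h1] at hmem
      exact ih _ _ _ h hmem
    · rw [if_neg h1] at hmem
      rcases List.mem_cons.1 h with hj | hj
      · have := pvOpn_lb _ _ _ hmem; omega
      · exact ih _ _ _ hj hmem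
    · rw [if_neg h1] at hmem
      exact ih _ _ _ h hmem

-- (8) the backward pass exhausts count when enough opens remain
theorem pvAback_snd : ∀ (m : List (Option Char)) (k : Int), 0 ≤ k → k ≤ pvCntO m →
    (pvAback m k).2 = 0 := by
  intro m; induction m with
  | nil => intro k h0 hle; simp [pvCntO] at hle; simp [pvAback]; omega
  | cons c t ih =>
    intro k h0 hle
    simp only [pvCntO] at hle
    simp only [pvAback]
    by_cases hk : k > 0
    · rw [if_pos hk]
      by_cases hc : c = some '('
      · rw [if_pos hc]
        rw [if_pos hc] at hle
        exact ih (k - 1) (by omega) (by omega)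
      · rw [if_neg hc]
        rw [if_neg hc] at hle
        exact ih k h0 (by omega)
    · rw [if_neg hk]; omega

theorem pvMarkL_nonpos : ∀ (m : List (Option Char)) (k : Int), k ≤ 0 → pvMarkL m k = m := by
  intro m; induction m with
  | nil => intro k h; rfl
  | cons c t ih =>
    intro k h
    have := pvCntO_nonneg t
    simp only [pvMarkL, ih k h]
    rw [if_neg (fun hx => by have := pvCntO_nonneg t; omega)]

theorem pvMarkL_snoc_open : ∀ (m : List (Option Char)) (k : Int), 0 < k →
    pvMarkL (m ++ [some '(']) k = pvMarkL m (k - 1) ++ [none] := by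
  intro m; induction m with
  | nil =>
    intro k hk
    simp [pvMarkL, pvCntO, hk]
  | cons c t ih =>
    intro k hk
    simp only [List.cons_append, pvMarkL, ih k hk, pvCntO_append]
    have hone : pvCntO [some '('] = 1 := by simp [pvCntO]
    rw [hone]
    congr 1
    by_cases hc : c = some '('
    · by_cases hlt : pvCntO t < k - 1
      · rw [if_pos ⟨hc, by omega⟩, if_pos ⟨hc, by omega⟩]
      · rw [if_neg (fun hx => hlt (by omega)), if_neg (fun hx => hlt (by omega))]
    · rw [if_neg (fun hx => hc hx.1), if_neg (fun hx => hc hx.1)]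

theorem pvMarkL_snoc_other : ∀ (m : List (Option Char)) (c : Option Char) (k : Int),
    c ≠ some '(' → pvMarkL (m ++ [c]) k = pvMarkL m k ++ [c] := by
  intro m; induction m with
  | nil =>
    intro c k hc
    simp only [List.nil_append, pvMarkL]
    rw [if_neg (fun hx => hc hx.1)]
  | cons d t ih =>
    intro c k hc
    simp only [List.cons_append, pvMarkL, ih c k hc, pvCntO_append]
    have hz : pvCntO [c] = 0 := by simp [pvCntO, hc]
    rw [hz]
    congr 1
    rw [add_zero]

-- (9) the backward pass marks the last k opens
theorem pvAback_fst : ∀ (r : List (Option Char)) (k : Int), 0 ≤ k → k ≤ pvCntO r →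
    (pvAback r k).1 = (pvMarkL r.reverse k).reverse := by
  intro r; induction r with
  | nil => intro k h0 hle; simp [pvAback, pvMarkL]
  | cons c t ih =>
    intro k h0 hle
    simp only [pvCntO] at hle
    simp only [pvAback, List.reverse_cons]
    by_cases hk : k > 0
    · rw [if_pos hk]
      by_cases hc : c = some '('
      · rw [if_pos hc]
        rw [if_pos hc] at hle
        rw [hc, pvMarkL_snoc_open _ k hk,
          ih (k - 1) (by omega) (by omega)]
        simp
      · rw [if_neg hc]
        rw [if_neg hc] at hle
        rw [pvMarkL_snoc_other _ c k hc,
          ih k h0 (by omega)]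
        simp
    · rw [if_neg hk]
      have hk0 : k = 0 := by omega
      subst hk0
      rw [pvMarkL_nonpos _ 0 le_rfl]
      simp

-- (10) marking the last k opens of a mask = adding the last k open indices to the set
theorem pvMarkL_maskW : ∀ (l : List Char) (i0 : Int) (R : List Int) (k : Int), 0 ≤ k →
    (∀ j ∈ R, j ∉ pvOpn l i0) →
    pvMarkL (pvMaskW l i0 R) k
      = pvMaskW l i0 (R ++ (pvOpn l i0).drop ((pvOpn l i0).length - k.toNat)) := by
  intro l; induction l with
  | nil => intro i0 R k hk hd; rfl
  | cons c t ih =>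
    intro i0 R k hk hd
    have hdt : ∀ j ∈ R, j ∉ pvOpn t (i0 + 1) := by
      intro j hj hmem
      apply hd j hj
      simp only [pvOpn]
      split_ifs
      · exact List.mem_cons_of_mem _ hmem
      · exact hmem
    have hcnt := pvCntO_maskW t (i0 + 1) R hdt
    have hlbT : ∀ j ∈ pvOpn t (i0 + 1), i0 + 1 ≤ j := fun j hj => pvOpn_lb _ _ _ hj
    have hiht := ih (i0 + 1) R k hk hdt
    by_cases hc : c = '('
    · subst hc
      have hio : i0 ∉ R := fun hi => hd i0 hi (by simp [pvOpn])
      have hopn : pvOpn ('(' :: t) i0 = i0 :: pvOpn t (i0 + 1) := by simp [pvOpn]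
      rw [hopn]
      simp only [pvMaskW, if_neg hio, pvMarkL, hcnt]
      by_cases hlt : ((pvOpn t (i0 + 1)).length : Int) < k
      · have hdrop : (i0 :: pvOpn t (i0 + 1)).length - k.toNat = 0 := by
          simp only [List.length_cons]; omega
        rw [hdrop, List.drop_zero]
        have hmem : i0 ∈ R ++ i0 :: pvOpn t (i0 + 1) := by simp
        rw [if_pos ⟨by trivial, hlt⟩, if_pos hmem]
        have hdrop2 : (pvOpn t (i0 + 1)).length - k.toNat = 0 := by omega
        rw [hdrop2, List.drop_zero] at hiht
        rw [hiht]
        congr 1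
        apply pvMaskW_congr
        intro j hj
        constructor
        · intro hx
          rcases List.mem_append.1 hx with hx | hx
          · exact List.mem_append.2 (Or.inl hx)
          · exact List.mem_append.2 (Or.inr (List.mem_cons_of_mem _ hx))
        · intro hx
          rcases List.mem_append.1 hx with hx | hx
          · exact List.mem_append.2 (Or.inl hx)
          · rcases List.mem_cons.1 hx with hx | hx
            · omega
            · exact List.mem_append.2 (Or.inr hx)
      · have hge : k.toNat ≤ (pvOpn t (i0 + 1)).length := by omega
        have hdrop : (i0 :: pvOpn t (i0 + 1)).length - k.toNat
            = ((pvOpn t (i0 + 1)).length - k.toNat) + 1 := by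
          simp only [List.length_cons]; omega
        rw [hdrop, List.drop_succ_cons]
        have hnm : i0 ∉ R ++ (pvOpn t (i0 + 1)).drop ((pvOpn t (i0 + 1)).length - k.toNat) := by
          intro hx
          rcases List.mem_append.1 hx with hx | hx
          · exact hio hx
          · have := hlbT i0 (List.mem_of_mem_drop hx); omega
        rw [if_neg (fun hx => hlt hx.2), if_neg hnm, hiht]
    · have hopn : pvOpn (c :: t) i0 = pvOpn t (i0 + 1) := by simp [pvOpn, hc]
      rw [hopn]
      simp only [pvMaskW, pvMarkL]
      have hhd : (if i0 ∈ R then (none : Option Char) else some c) ≠ some '(' := by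
        split_ifs with h
        · simp
        · simp [hc]
      have hnm : i0 ∉ R ++ (pvOpn t (i0 + 1)).drop ((pvOpn t (i0 + 1)).length - k.toNat) ↔ i0 ∉ R := by
        constructor
        · intro hx hr; exact hx (List.mem_append.2 (Or.inl hr))
        · intro hx hy
          rcases List.mem_append.1 hy with hy | hy
          · exact hx hy
          · have := hlbT i0 (List.mem_of_mem_drop hy); omega
      rw [if_neg (fun hx => hhd hx.1), hiht]
      congr 1
      by_cases hr : i0 ∈ R
      · rw [if_pos hr, if_pos (List.mem_append.2 (Or.inl hr))]
      · rw [if_neg hr, if_neg (fun hx => (hnm.2 hr) hx)]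

theorem pvFilterMap_maskW : ∀ (l : List Char) (i0 : Int) (R : List Int),
    (pvMaskW l i0 R).filterMap id = pvSel l i0 R := by
  intro l; induction l with
  | nil => intro i0 R; rfl
  | cons c t ih =>
    intro i0 R
    simp only [pvMaskW, pvSel]
    have hid : List.filterMap (fun x => x) (pvMaskW t (i0 + 1) R)
        = pvSel t (i0 + 1) R := ih (i0 + 1) R
    by_cases hm : i0 ∈ R
    · simp [hm, hid]
    · simp [hm, hid]

theorem pvFilterMap_enum : ∀ (l : List Char) (i0 : Int) (rem : PySem.Set Int) (R : List Int),
    (∀ j, j ∈ rem ↔ j ∈ R) →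
    (PySem.List.enumerate l i0).filterMap
        (fun ic => if PySem.Set.contains rem ic.1 then none else some ic.2)
      = pvSel l i0 R := by
  intro l; induction l with
  | nil => intro i0 rem R h; simp [PySem.List.enumerate_nil, pvSel]
  | cons c t ih =>
    intro i0 rem R h
    rw [PySem.List.enumerate_cons]
    simp only [List.filterMap_cons, pvSel]
    by_cases hm : i0 ∈ R
    · have hr : i0 ∈ rem := (h i0).2 hm
      simp only [hr, hm, if_pos, if_true, List.mem_cons]
      simp [hr, hm]
      simpa using ih (i0 + 1) rem R h
    · have hr : i0 ∉ rem := fun hx => hm ((h i0).1 hx)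
      simp [hr, hm]
      simpa using ih (i0 + 1) rem R h

-- ===== VERDICT (by name: the statement is the Claim_ definition above) =====
theorem parentheses2_spec : Claim_equal_parentheses2 := by
  intro s _
  show parentheses2 s = parentheses2_alt s
  have hcf0 : 0 ≤ pvFb s.toList 0 := pvFb_nonneg s.toList 0 le_rfl
  have hcfle : pvFb s.toList 0 ≤ ((pvOpn s.toList 0).length : Int) := by
    have := pvFb_le s.toList 0 0; omega
  have hdisj : ∀ j ∈ pvBad s.toList 0 0, j ∉ pvOpn s.toList 0 :=
    fun j hj => pvBad_disj_opn s.toList 0 0 j hj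
  have hcnt : pvCntO (pvMaskW s.toList 0 (pvBad s.toList 0 0)) = ((pvOpn s.toList 0).length : Int) :=
    pvCntO_maskW s.toList 0 (pvBad s.toList 0 0) hdisj
  have hcntrev : pvFb s.toList 0 ≤ pvCntO (pvMaskW s.toList 0 (pvBad s.toList 0 0)).reverse := by
    rw [pvCntO_reverse, hcnt]; exact hcfle
  have hsnd := pvAback_snd _ _ hcf0 hcntrev
  have hfst := pvAback_fst (pvMaskW s.toList 0 (pvBad s.toList 0 0)).reverse (pvFb s.toList 0)
    hcf0 hcntrev
  -- the A side
  have hA : parentheses2 s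
      = String.ofList ((pvMarkL (pvMaskW s.toList 0 (pvBad s.toList 0 0)) (pvFb s.toList 0)).filterMap id) := by
    simp only [parentheses2, pvAfwd_eq s.toList 0 0 le_rfl]
    rw [hsnd, hfst]
    simp
  -- the B side
  have hfold := pvBfold_eq s.toList 0 0 [] PySem.Set.empty
  have hslice : PySem.List.slice (pvOpn s.toList 0)
      (some (((pvOpn s.toList 0).length : Int) - pvFb s.toList 0)) none
      = (pvOpn s.toList 0).drop ((pvOpn s.toList 0).length - (pvFb s.toList 0).toNat) := by
    rw [PySem.List.slice_from _ (by omega)]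
    congr 1
    omega
  have hB : parentheses2_alt s
      = String.ofList (pvSel s.toList 0 (pvBad s.toList 0 0
          ++ (pvOpn s.toList 0).drop ((pvOpn s.toList 0).length - (pvFb s.toList 0).toNat))) := by
    simp only [parentheses2_alt, hfold, List.nil_append]
    rw [hslice]
    congr 1
    apply pvFilterMap_enum
    intro j
    simp only [PySem.Set.mem_update, List.mem_append]
    constructor
    · intro h
      rcases h with h | h
      · rcases h with h | h
        · simp [PySem.Set.empty] at h
        · exact Or.inl h
      · exact Or.inr h
    · intro h
      rcases h with h | h
      · exact Or.inl (Or.inr h)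
      · exact Or.inr h
  rw [hA, hB,
    pvMarkL_maskW s.toList 0 (pvBad s.toList 0 0) (pvFb s.toList 0) hcf0 hdisj,
    pvFilterMap_maskW]
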